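-- pv_equiv track=rewrite | github.com/hwangdeokThien/kodo-ocr-app | ai_base/app/ocr/model.py | construct_text
-- ===== SOURCE A (Python) =====
-- def construct_text(text_det_reg):
--     """
--     Constructs a text output that mimics the original layout of the scanned document.
--
--     Args:
--         text_det_reg: List of tuples containing recognized text and bounding box coordinates
--
--     Returns:
--         A formatted string that mimics the document layout
--     """
--     # Sort the detected text regions by their vertical position (y_min)
--     text_det_reg.sort(key=lambda x: x[1][1])
--
--     # Initialize variables for formatted text output
--     formatted_text = ""
--     previous_y_min = None
--     line_text = ""
--
--     # Define thresholds for detecting new lines and spaces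
--     line_threshold = 20
--     space_threshold = 50
--
--     for i, (recognized_text, (x_min, y_min, x_max, y_max)) in enumerate(text_det_reg):
--         # Check if this is a new line
--         if previous_y_min is not None and abs(y_min - previous_y_min) > line_threshold:
--             # Add the current line to the formatted text and start a new line
--             formatted_text += line_text.strip() + "\n"
--             line_text = ""
--
--         # Check if a space should be added (if there's a significant gap between words on the same line)
--         if line_text and (x_min - text_det_reg[i - 1][1][2] > space_threshold):
--             line_text += " "  # Add a space
--
--         # Add the recognized text for the current region
--         line_text += recognized_text + " "
--
--         # Update the previous_y_min for the next iteration
--         previous_y_min = y_min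
--
--     # Add the last line to the formatted text
--     formatted_text += line_text.strip()
--
--     return formatted_text
-- ===== SOURCE B (Python) =====
-- def construct_text(text_det_reg):
--     # Two-pass re-implementation: first group the sorted boxes into lines,
--     # then render each line.  (Sorts text_det_reg in place, like the original.)
--     text_det_reg.sort(key=lambda x: x[1][1])
--     if not text_det_reg:
--         return ""
--     line_threshold = 20
--     space_threshold = 50
--     groups = []
--     current = [text_det_reg[0]]
--     prev_y = text_det_reg[0][1][1]
--     for item in text_det_reg[1:]:
--         y = item[1][1]
--         if abs(y - prev_y) > line_threshold:
--             groups.append(current)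
--             current = [item]
--         else:
--             current.append(item)
--         prev_y = y
--     groups.append(current)
--     lines = []
--     for g in groups:
--         line = g[0][0]
--         for prev, cur in zip(g, g[1:]):
--             sep = "  " if cur[1][0] - prev[1][2] > space_threshold else " "
--             line += sep + cur[0]
--         lines.append(line.strip())
--     return "\n".join(lines)
-- ===== Notes on version B (the rewrite author's own statement) =====
-- stated objective: alternative
-- what changed: Replaces A's single fused loop with mutable line_text/previous_y_min state (and its wrap-around xs[i-1] lookup) by two explicit passes: first partition the sorted boxes into contiguous line-groups, then render each group with an explicit separator (two spaces on a large x-gap, one otherwise) and strip it, joining the lines with newline.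
import Mathlib
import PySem

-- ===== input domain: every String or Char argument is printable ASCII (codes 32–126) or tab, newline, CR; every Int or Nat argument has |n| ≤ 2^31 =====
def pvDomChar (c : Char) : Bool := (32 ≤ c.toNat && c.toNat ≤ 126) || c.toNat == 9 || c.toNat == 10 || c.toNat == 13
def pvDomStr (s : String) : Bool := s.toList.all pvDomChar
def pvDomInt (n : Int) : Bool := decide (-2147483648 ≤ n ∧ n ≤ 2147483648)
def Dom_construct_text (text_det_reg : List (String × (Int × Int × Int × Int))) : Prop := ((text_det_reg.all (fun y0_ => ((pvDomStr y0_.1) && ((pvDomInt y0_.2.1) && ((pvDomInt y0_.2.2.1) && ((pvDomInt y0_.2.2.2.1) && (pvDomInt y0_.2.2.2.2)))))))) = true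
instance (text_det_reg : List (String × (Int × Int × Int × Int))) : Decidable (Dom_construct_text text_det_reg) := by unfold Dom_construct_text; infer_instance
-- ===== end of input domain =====

-- B replaces A's single fused loop (mutable line_text/previous_y_min) by two passes:
-- group the sorted boxes into lines, then render each line; return values proved equal
-- (both Pythons sort their argument in place; the claim is about the return value only).

-- ===== PORT A =====
-- loop body of A's for-loop; state = (formatted_text, previous_y_min, line_text), strings as List Char
def pvStepA (xs : List (String × (Int × Int × Int × Int)))
    (st : List Char × Option Int × List Char)
    (ib : Int × (String × (Int × Int × Int × Int))) : List Char × Option Int × List Char :=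
  -- new-line check
  let p1 : List Char × List Char :=
    match st.2.1 with
    | some py =>
        if (ib.2.2.2.1 - py).natAbs > 20 then (st.1 ++ PySem.Chars.strip st.2.2 ++ ['\n'], ([] : List Char))
        else (st.1, st.2.2)
    | none => (st.1, st.2.2)
  -- space check: line_text truthy and x_min - text_det_reg[i-1][1][2] > 50  (xs[i-1]: Python index, wraps at i=0)
  let gap : Bool :=
    match PySem.List.pyGet? xs (ib.1 - 1) with
    | some pb => decide (pb.2.2.2.1 + 50 < ib.2.2.1)
    | none => false
  let lt2 : List Char := if !p1.2.isEmpty && gap then p1.2 ++ [' '] else p1.2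
  (p1.1, some ib.2.2.2.1, lt2 ++ ib.2.1.toList ++ [' '])

def construct_text (text_det_reg : List (String × (Int × Int × Int × Int))) : String :=
  let xs := PySem.List.sorted text_det_reg (fun x => x.2.2.1) false
  let st := (PySem.List.enumerate xs 0).foldl (pvStepA xs) (([] : List Char), (none : Option Int), ([] : List Char))
  String.ofList (st.1 ++ PySem.Chars.strip st.2.2)

-- ===== PORT B =====
-- first pass: partition the sorted boxes into line-groups (current-group accumulator, as in Source B)
def pvGroupGo (prevY : Int) (cur : List (String × (Int × Int × Int × Int))) :
    List (String × (Int × Int × Int × Int)) → List (List (String × (Int × Int × Int × Int)))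
  | [] => [cur]
  | b :: bs =>
      if (b.2.2.1 - prevY).natAbs > 20 then cur :: pvGroupGo b.2.2.1 [b] bs
      else pvGroupGo b.2.2.1 (cur ++ [b]) bs

-- second pass, inner loop: line = g[0][0]; for prev, cur in zip(g, g[1:]): line += sep + cur[0]
def pvLineB (x : String × (Int × Int × Int × Int)) (rest : List (String × (Int × Int × Int × Int))) : List Char :=
  ((x :: rest).zip rest).foldl
    (fun line pc => line ++ (if pc.1.2.2.2.1 + 50 < pc.2.2.1 then [' ', ' '] else [' ']) ++ pc.2.1.toList)
    x.1.toList

def pvRenderLine (g : List (String × (Int × Int × Int × Int))) : List Char :=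
  match g with
  | [] => []          -- unreachable: groups are nonempty
  | x :: rest => PySem.Chars.strip (pvLineB x rest)

def construct_text_alt (text_det_reg : List (String × (Int × Int × Int × Int))) : String :=
  let xs := PySem.List.sorted text_det_reg (fun x => x.2.2.1) false
  match xs with
  | [] => ""
  | x :: rest =>
      String.ofList (PySem.Chars.join ['\n'] ((pvGroupGo x.2.2.1 [x] rest).map pvRenderLine))

-- ===== PRECONDITION & SPEC =====
def Spec_construct_text (text_det_reg : List (String × (Int × Int × Int × Int))) (out : String) : Prop := out = construct_text_alt text_det_reg
instance (text_det_reg : List (String × (Int × Int × Int × Int))) (out : String) : Decidable (Spec_construct_text text_det_reg out) := by unfold Spec_construct_text; infer_instance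

-- ===== CLAIM (what is proved, stated in full; the proofs are below) =====
def Claim_equal_construct_text : Prop := ∀ (text_det_reg : List (String × (Int × Int × Int × Int))), Dom_construct_text text_det_reg → Spec_construct_text text_det_reg (construct_text text_det_reg)

-- ===== LEMMAS AND PROOFS =====

-- A's raw (unstripped, trailing-space) line_text built for one group
def pvRaw (g : List (String × (Int × Int × Int × Int))) : List Char :=
  match g with
  | [] => []
  | x :: rest =>
      ((x :: rest).zip rest).foldl
        (fun line pc => line ++ (if pc.1.2.2.2.1 + 50 < pc.2.2.1 then [' '] else []) ++ pc.2.1.toList ++ [' '])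
        (x.1.toList ++ [' '])

def pvFinish (st : List Char × Option Int × List Char) : List Char :=
  st.1 ++ PySem.Chars.strip st.2.2

theorem pvRaw_cons (x : String × (Int × Int × Int × Int)) (rest : List (String × (Int × Int × Int × Int))) :
    pvRaw (x :: rest) = ((x :: rest).zip rest).foldl
        (fun line pc => line ++ (if pc.1.2.2.2.1 + 50 < pc.2.2.1 then [' '] else []) ++ pc.2.1.toList ++ [' '])
        (x.1.toList ++ [' ']) := rfl

theorem pvGroupGo_nil (y : Int) (cur : List (String × (Int × Int × Int × Int))) :
    pvGroupGo y cur [] = [cur] := rfl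

theorem pvGroupGo_cons (y : Int) (cur : List (String × (Int × Int × Int × Int)))
    (b : String × (Int × Int × Int × Int)) (bs : List (String × (Int × Int × Int × Int))) :
    pvGroupGo y cur (b :: bs)
      = if (b.2.2.1 - y).natAbs > 20 then cur :: pvGroupGo b.2.2.1 [b] bs
        else pvGroupGo b.2.2.1 (cur ++ [b]) bs := rfl

theorem pv_space_isspace : PySem.Chars.isspace ' ' = true := by decide

theorem pv_rstrip_snoc (cs : List Char) :
    PySem.Chars.rstrip (cs ++ [' ']) = PySem.Chars.rstrip cs := by
  simp [PySem.Chars.rstrip, pv_space_isspace]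

theorem pv_strip_snoc_space (cs : List Char) :
    PySem.Chars.strip (cs ++ [' ']) = PySem.Chars.strip cs := by
  unfold PySem.Chars.strip PySem.Chars.lstrip
  rw [List.dropWhile_append]
  split
  · next h =>
    rw [List.isEmpty_iff] at h
    rw [h]
    simp [List.dropWhile, PySem.Chars.rstrip, pv_space_isspace]
  · exact pv_rstrip_snoc _

theorem pv_fold_snocsp (ps : List ((String × (Int × Int × Int × Int)) × (String × (Int × Int × Int × Int)))) :
    ∀ (init : List Char),
    ps.foldl (fun line pc => line ++ (if pc.1.2.2.2.1 + 50 < pc.2.2.1 then [' '] else []) ++ pc.2.1.toList ++ [' ']) (init ++ [' '])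
      = ps.foldl (fun line pc => line ++ (if pc.1.2.2.2.1 + 50 < pc.2.2.1 then [' ', ' '] else [' ']) ++ pc.2.1.toList) init ++ [' '] := by
  induction ps with
  | nil => intro init; simp
  | cons pc ps ih =>
    intro init
    simp only [List.foldl_cons]
    rw [show init ++ [' '] ++ (if pc.1.2.2.2.1 + 50 < pc.2.2.1 then [' '] else []) ++ pc.2.1.toList ++ [' ']
        = (init ++ (if pc.1.2.2.2.1 + 50 < pc.2.2.1 then [' ', ' '] else [' ']) ++ pc.2.1.toList) ++ [' '] by
      split <;> simp]
    exact ih _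

theorem pvRaw_eq (x : String × (Int × Int × Int × Int)) (rest : List (String × (Int × Int × Int × Int))) :
    pvRaw (x :: rest) = pvLineB x rest ++ [' '] := by
  rw [pvRaw_cons]
  exact pv_fold_snocsp _ _

theorem pvRaw_ne_nil (x : String × (Int × Int × Int × Int)) (rest : List (String × (Int × Int × Int × Int))) :
    pvRaw (x :: rest) ≠ [] := by
  rw [pvRaw_eq]; simp

theorem pv_strip_pvRaw (x : String × (Int × Int × Int × Int)) (rest : List (String × (Int × Int × Int × Int))) :
    PySem.Chars.strip (pvRaw (x :: rest)) = pvRenderLine (x :: rest) := by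
  rw [pvRaw_eq, pv_strip_snoc_space]; rfl

theorem pv_zip_snoc (x b : String × (Int × Int × Int × Int)) (rest : List (String × (Int × Int × Int × Int))) :
    ((x :: (rest ++ [b])).zip (rest ++ [b]))
      = ((x :: rest).zip rest) ++ [((x :: rest).getLast (by simp), b)] := by
  induction rest generalizing x with
  | nil => simp
  | cons y ys ih =>
    simp only [List.cons_append, List.zip_cons_cons]
    rw [ih y]
    simp [List.getLast]

theorem pvRaw_snoc (cur : List (String × (Int × Int × Int × Int)))
    (p b : String × (Int × Int × Int × Int)) (h : cur.getLast? = some p) :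
    pvRaw (cur ++ [b])
      = pvRaw cur ++ (if p.2.2.2.1 + 50 < b.2.1 then [' '] else []) ++ b.1.toList ++ [' '] := by
  cases cur with
  | nil => simp at h
  | cons x rest =>
    have hlast : (x :: rest).getLast (by simp) = p := List.getLast_of_mem_getLast? h
    rw [List.cons_append, pvRaw_cons, pvRaw_cons, pv_zip_snoc, List.foldl_append, hlast]
    simp

theorem pvGroupGo_ne_nil (y : Int) (cur : List (String × (Int × Int × Int × Int)))
    (ys : List (String × (Int × Int × Int × Int))) : pvGroupGo y cur ys ≠ [] := by
  induction ys generalizing y cur with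
  | nil => simp [pvGroupGo_nil]
  | cons b bs ih =>
    rw [pvGroupGo_cons]
    split
    · simp
    · exact ih _ _

theorem pv_join_cons (sep a : List Char) (l : List (List Char)) (h : l ≠ []) :
    PySem.Chars.join sep (a :: l) = a ++ sep ++ PySem.Chars.join sep l := by
  cases l with
  | nil => exact absurd rfl h
  | cons q rest => exact PySem.Chars.join_cons_cons sep a q rest

theorem pv_stepA_newline (xs : List (String × (Int × Int × Int × Int))) (ft : List Char)
    (p b x : String × (Int × Int × Int × Int)) (rest : List (String × (Int × Int × Int × Int))) (i : Int)
    (hnl : (b.2.2.1 - p.2.2.1).natAbs > 20) :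
    pvStepA xs (ft, some p.2.2.1, pvRaw (x :: rest)) (i, b)
      = (ft ++ PySem.Chars.strip (pvRaw (x :: rest)) ++ ['\n'], some b.2.2.1, pvRaw [b]) := by
  simp only [pvStepA, hnl, if_pos, List.isEmpty_nil, Bool.not_true, Bool.false_and, if_neg,
    Bool.false_eq_true, not_false_iff, List.nil_append, pvRaw_cons, List.zip_nil_right, List.foldl_nil]

theorem pv_stepA_sameline (init' bs : List (String × (Int × Int × Int × Int))) (ft : List Char)
    (p b x : String × (Int × Int × Int × Int)) (rest : List (String × (Int × Int × Int × Int)))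
    (h : (x :: rest).getLast? = some p)
    (hnl : ¬ (b.2.2.1 - p.2.2.1).natAbs > 20) :
    pvStepA ((init' ++ [p]) ++ (b :: bs)) (ft, some p.2.2.1, pvRaw (x :: rest)) (((init'.length : Int) + 1), b)
      = (ft, some b.2.2.1, pvRaw ((x :: rest) ++ [b])) := by
  have hget : PySem.List.pyGet? ((init' ++ [p]) ++ (b :: bs)) ((init'.length : Int) + 1 - 1) = some p := by
    have he : (init' ++ [p]) ++ (b :: bs) = init' ++ (p :: (b :: bs)) := by simp
    have h2 : ((init'.length : Int) + 1 - 1) = (init'.length : Int) := by ring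
    rw [he, h2]
    exact PySem.List.pyGet?_append_length _ _ _
  have hraw : pvRaw (x :: rest) ≠ [] := pvRaw_ne_nil x rest
  simp only [pvStepA, hnl, hget]
  rw [pvRaw_snoc (x :: rest) p b h]
  by_cases hg : p.2.2.2.1 + 50 < b.2.1 <;> simp [hg, hraw]

theorem pv_loopA_go (ys : List (String × (Int × Int × Int × Int))) :
    ∀ (init' cur : List (String × (Int × Int × Int × Int))) (p : String × (Int × Int × Int × Int)) (ft : List Char),
    cur.getLast? = some p →
    pvFinish ((PySem.List.enumerate ys ((init'.length : Int) + 1)).foldl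
        (pvStepA ((init' ++ [p]) ++ ys)) (ft, some p.2.2.1, pvRaw cur))
      = ft ++ PySem.Chars.join ['\n'] ((pvGroupGo p.2.2.1 cur ys).map pvRenderLine) := by
  induction ys with
  | nil =>
    intro init' cur p ft h
    obtain ⟨x, rest, rfl⟩ : ∃ x rest, cur = x :: rest := by
      cases cur with
      | nil => simp at h
      | cons x rest => exact ⟨x, rest, rfl⟩
    simp only [PySem.List.enumerate_nil, List.foldl_nil, pvFinish, pvGroupGo_nil, List.map_cons,
      List.map_nil, PySem.Chars.join_singleton]
    rw [pv_strip_pvRaw]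
  | cons b bs ih =>
    intro init' cur p ft h
    obtain ⟨x, rest, rfl⟩ : ∃ x rest, cur = x :: rest := by
      cases cur with
      | nil => simp at h
      | cons x rest => exact ⟨x, rest, rfl⟩
    rw [PySem.List.enumerate_cons, List.foldl_cons]
    have hxs : (init' ++ [p]) ++ (b :: bs) = (((init' ++ [p]) ++ [b]) ++ bs) := by simp
    have hstart : (init'.length : Int) + 1 + 1 = (((init' ++ [p]).length : Int) + 1) := by simp
    by_cases hnl : (b.2.2.1 - p.2.2.1).natAbs > 20
    · -- new line starts at b
      rw [pv_stepA_newline _ _ _ _ _ _ _ hnl, hxs, hstart,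
        ih (init' ++ [p]) [b] b _ (by simp)]
      rw [pvGroupGo_cons, if_pos hnl, List.map_cons,
        pv_join_cons _ _ _ (by
          simp only [ne_eq, List.map_eq_nil_iff]
          exact pvGroupGo_ne_nil _ _ _),
        pv_strip_pvRaw]
      simp
    · -- b continues the current line
      rw [pv_stepA_sameline init' bs ft p b x rest h hnl, hxs, hstart,
        ih (init' ++ [p]) ((x :: rest) ++ [b]) b _ List.getLast?_concat]
      rw [pvGroupGo_cons, if_neg hnl]

-- ===== VERDICT (by name: the statement is the Claim_ definition above) =====
theorem construct_text_spec : Claim_equal_construct_text := by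
  intro r _
  simp only [Spec_construct_text, construct_text, construct_text_alt]
  cases hxs : PySem.List.sorted r (fun x => x.2.2.1) false with
  | nil =>
    simp [PySem.List.enumerate_nil, PySem.Chars.strip, PySem.Chars.lstrip, PySem.Chars.rstrip]
  | cons x rest =>
    simp only [PySem.List.enumerate_cons, List.foldl_cons]
    have hstep0 : pvStepA (x :: rest) (([] : List Char), (none : Option Int), ([] : List Char)) (0, x)
        = (([] : List Char), some x.2.2.1, pvRaw [x]) := by
      simp [pvStepA, pvRaw_cons]
    rw [hstep0]
    have hmain := pv_loopA_go rest [] [x] x [] (by simp)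
    simp only [pvFinish, List.nil_append, List.length_nil, Nat.cast_zero, zero_add] at hmain
    rw [show (0 : Int) + 1 = 1 by norm_num]
    rw [show ([x] ++ rest : List (String × (Int × Int × Int × Int))) = x :: rest by simp] at hmain
    rw [hmain]
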